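-- pv_equiv track=rewrite | github.com/BrynjarGeir/AdventOfCode | 2023/day8.py | populateMap
-- ===== SOURCE A (Python) =====
-- def populateMap(lines: list[str]) -> dict:
--     mapping, instructions = dict(), ""
--
--     seen_empty = False
--
--     for line in lines:
--         if line == "":
--             seen_empty = True
--             continue
--         if seen_empty:
--             station, LR = line.split("=")
--             station = station.strip()
--             LR = LR.strip()
--             left, right = LR.split(", ")
--             left, right = left[1:], right[:-1]
--
--             mapping[station] = [left, right]
--         else:
--             instructions += line
--     instructions = [1 if i == 'R' else 0 for i in instructions]
--     return mapping, instructions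
-- ===== SOURCE B (Python) =====
-- def populateMap(lines: list[str]) -> dict:
--     # Split the input up front instead of carrying a seen_empty flag through one pass.
--     try:
--         sep = lines.index("")
--     except ValueError:
--         sep = len(lines)
--     instructions = [1 if c == 'R' else 0 for c in "".join(lines[:sep])]
--     mapping = {}
--     for line in lines[sep + 1:]:
--         if line == "":
--             continue
--         station, lr = line.split("=")
--         left, right = lr.strip().split(", ")
--         mapping[station.strip()] = [left[1:], right[:-1]]
--     return mapping, instructions
-- ===== Notes on version B (the rewrite author's own statement) =====
-- stated objective: alternative
-- what changed: Replaces A's single pass with a seen_empty flag by an up-front split: find the index of the first blank line, join the prefix into the instruction list, and build the mapping from the suffix slice.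
import Mathlib
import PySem

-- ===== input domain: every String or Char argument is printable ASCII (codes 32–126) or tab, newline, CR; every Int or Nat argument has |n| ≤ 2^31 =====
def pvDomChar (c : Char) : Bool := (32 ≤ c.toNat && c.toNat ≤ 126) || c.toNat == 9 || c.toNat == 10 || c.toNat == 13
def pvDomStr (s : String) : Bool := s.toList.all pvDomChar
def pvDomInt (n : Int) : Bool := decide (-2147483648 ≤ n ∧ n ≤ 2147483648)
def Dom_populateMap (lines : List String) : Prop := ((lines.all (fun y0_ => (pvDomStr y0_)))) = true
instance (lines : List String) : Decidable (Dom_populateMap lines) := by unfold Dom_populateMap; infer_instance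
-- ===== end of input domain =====

-- B replaces A's one-pass seen_empty state machine by an up-front split of the input at the
-- first blank line (index + slices + join); same return value; A's instruction String is ported as List Char.

-- ===== PORT A =====
-- parse one node line exactly as A's body does (split "=", strip, split ", ", trim parens);
-- the `_ => d` fallbacks are unreachable under Pre_ (Python raises ValueError there).
def parseLineA (d : PySem.Dict String (List String)) (line : String) :
    PySem.Dict String (List String) :=
  match PySem.Str.split? line "=" with
  | some [station0, lr0] =>
    let station := PySem.Str.strip station0
    let lr := PySem.Str.strip lr0
    match PySem.Str.split? lr ", " with
    | some [left, right] =>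
      d.insert station
        [PySem.Str.slice left (some 1) none, PySem.Str.slice right none (some (-1))]
    | _ => d
  | _ => d

-- A's loop state: (mapping, instructions as chars, seen_empty)
def stepA (st : PySem.Dict String (List String) × List Char × Bool) (line : String) :
    PySem.Dict String (List String) × List Char × Bool :=
  if line = "" then (st.1, st.2.1, true)
  else if st.2.2 = true then (parseLineA st.1 line, st.2.1, true)
  else (st.1, st.2.1 ++ line.toList, false)

def runA (lines : List String) : PySem.Dict String (List String) × List Char × Bool :=
  lines.foldl stepA (PySem.Dict.empty, ([] : List Char), false)

def populateMap (lines : List String) : (List (String × List String)) × List Int :=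
  ((runA lines).1.items, (runA lines).2.1.map (fun c => if c = 'R' then (1 : Int) else 0))

-- ===== PORT B =====
def parseLineB (d : PySem.Dict String (List String)) (line : String) :
    PySem.Dict String (List String) :=
  match PySem.Str.split? line "=" with
  | some [station, lr] =>
    match PySem.Str.split? (PySem.Str.strip lr) ", " with
    | some [left, right] =>
      d.insert (PySem.Str.strip station)
        [PySem.Str.slice left (some 1) none, PySem.Str.slice right none (some (-1))]
    | _ => d
  | _ => d

-- index of the first blank line, defaulting to len(lines) (B's try/except around lines.index(""))
def sepB (lines : List String) : Nat :=
  (PySem.List.index? lines "").getD lines.length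

def instrB (lines : List String) : List Int :=
  (PySem.Str.join "" (PySem.List.slice lines none (some ((sepB lines : Int))))).toList.map
    (fun c => if c = 'R' then (1 : Int) else 0)

def mapB (lines : List String) : PySem.Dict String (List String) :=
  (PySem.List.slice lines (some ((sepB lines : Int) + 1)) none).foldl
    (fun d line => if line = "" then d else parseLineB d line) PySem.Dict.empty

def populateMap_alt (lines : List String) : (List (String × List String)) × List Int :=
  ((mapB lines).items, instrB lines)

-- ===== PRECONDITION & SPEC =====
-- a node line is well formed iff line.split("=") and LR.split(", ") both unpack into two pieces
def okLine (line : String) : Bool :=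
  match PySem.Str.split? line "=" with
  | some [_, lr] =>
    match PySem.Str.split? (PySem.Str.strip lr) ", " with
    | some parts => parts.length == 2
    | none => false
  | _ => false

-- Pre_ excludes exactly the inputs where Python A raises ValueError: a non-empty line after the
-- first blank line whose '='-split or ', '-split does not unpack into exactly two pieces.
def Pre_populateMap (lines : List String) : Prop :=
  ∀ l ∈ (lines.dropWhile (fun s => !(s == ""))).drop 1, l ≠ "" → okLine l = true
instance (lines : List String) : Decidable (Pre_populateMap lines) := by
  unfold Pre_populateMap; infer_instance

def pvWitness_populateMap : List String :=
  ["LRL", "RR", "", "AAA = (BBB, CCC)", "", "ZZZ = (AAA, BBB)"]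

def Spec_populateMap (lines : List String) (out : (List (String × List String)) × List Int) : Prop := out = populateMap_alt lines
instance (lines : List String) (out : (List (String × List String)) × List Int) : Decidable (Spec_populateMap lines out) := by unfold Spec_populateMap; infer_instance

-- ===== CLAIM (what is proved, stated in full; the proofs are below) =====
def Claim_equal_populateMap : Prop := ∀ (lines : List String), Dom_populateMap lines → Pre_populateMap lines → Spec_populateMap lines (populateMap lines)

-- ===== LEMMAS AND PROOFS =====

theorem parseLineA_eq_parseLineB : parseLineA = parseLineB := rfl

-- "".join is concatenation
theorem join_empty_sep (css : List (List Char)) :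
    PySem.Chars.join [] css = css.flatten := by
  induction css with
  | nil => simp [PySem.Chars.join_nil]
  | cons c r ih =>
    cases r with
    | nil => simp [PySem.Chars.join_singleton]
    | cons b t => rw [PySem.Chars.join_cons_cons, ih]; simp

theorem stepA_blank (st : PySem.Dict String (List String) × List Char × Bool) :
    stepA st "" = (st.1, st.2.1, true) := by simp [stepA]

-- phase 1 of A's loop: before any blank line, lines only extend the instruction string
theorem foldl_stepA_phase1 (pre : List String) (d : PySem.Dict String (List String))
    (instr : List Char) (h : "" ∉ pre) :
    pre.foldl stepA (d, instr, false) =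
      (d, instr ++ (pre.map String.toList).flatten, false) := by
  induction pre generalizing instr with
  | nil => simp
  | cons l rest ih =>
    have hl : l ≠ "" := by intro hl; exact h (hl ▸ List.mem_cons_self)
    have hrest : "" ∉ rest := fun hm => h (List.mem_cons_of_mem _ hm)
    rw [List.foldl_cons]
    have hs : stepA (d, instr, false) l = (d, instr ++ l.toList, false) := by
      simp [stepA, hl]
    rw [hs, ih _ hrest]
    simp

-- phase 2 of A's loop: after the first blank line, only the mapping changes
theorem foldl_stepA_phase2 (post : List String) (d : PySem.Dict String (List String))
    (instr : List Char) :
    post.foldl stepA (d, instr, true) =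
      (post.foldl (fun d line => if line = "" then d else parseLineB d line) d, instr, true) := by
  induction post generalizing d with
  | nil => simp
  | cons l rest ih =>
    by_cases hl : l = ""
    · rw [List.foldl_cons, hl, stepA_blank, ih, List.foldl_cons]
      simp
    · rw [List.foldl_cons]
      have hs : stepA (d, instr, true) l = (parseLineA d l, instr, true) := by
        simp [stepA, hl]
      rw [hs, ih, List.foldl_cons, parseLineA_eq_parseLineB]
      simp [hl]

-- ===== VERDICT (by name: the statement is the Claim_ definition above) =====
theorem populateMap_spec : Claim_equal_populateMap := by
  intro lines _ _
  unfold Spec_populateMap populateMap populateMap_alt instrB mapB runA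
  cases h : PySem.List.index? lines "" with
  | none =>
    have hn : "" ∉ lines := (PySem.List.index?_eq_none_iff lines "").mp h
    have hsep : sepB lines = lines.length := by unfold sepB; rw [h]; rfl
    have hdrop : PySem.List.slice lines (some ((lines.length : Int) + 1)) none = [] := by
      have h1 : ((lines.length : Int) + 1) = ((lines.length + 1 : Nat) : Int) := by push_cast; ring
      rw [h1, PySem.List.slice_from_natCast]
      simp
    rw [hsep, hdrop, foldl_stepA_phase1 lines _ _ hn,
      PySem.List.slice_to_natCast, List.take_length]
    simp [PySem.Str.toList_join, join_empty_sep]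
  | some k =>
    obtain ⟨pre, suf, hdecomp, hlen, hpre⟩ :=
      (PySem.List.index?_eq_some_iff lines "" k).mp h
    subst hdecomp
    subst hlen
    have hsep : sepB (pre ++ "" :: suf) = pre.length := by unfold sepB; rw [h]; rfl
    have htake : PySem.List.slice (pre ++ "" :: suf) none (some ((pre.length : Int))) = pre := by
      rw [PySem.List.slice_to_natCast]
      exact List.take_left
    have hdrop : PySem.List.slice (pre ++ "" :: suf) (some ((pre.length : Int) + 1)) none = suf := by
      have h1 : ((pre.length : Int) + 1) = ((pre.length + 1 : Nat) : Int) := by push_cast; ring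
      have h2 : pre ++ "" :: suf = (pre ++ [""]) ++ suf := by simp
      have h3 : pre.length + 1 = (pre ++ [""]).length := by simp
      rw [h1, PySem.List.slice_from_natCast, h2, h3]
      exact List.drop_left
    rw [hsep, htake, hdrop, List.foldl_append, foldl_stepA_phase1 pre _ _ hpre,
      List.foldl_cons, stepA_blank, foldl_stepA_phase2]
    simp [PySem.Str.toList_join, join_empty_sep]
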